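-- pv_equiv track=rewrite | github.com/kbSSR/GLRRM | read.py | detectDailyFormat
-- ===== SOURCE A (Python) =====
-- def detectDailyFormat(data_lines):
--     #
--     #  First check for matching the CGLRRM format.
--     #  Valid lines have year, mn, q plus 7 or 8 data values.
--     #
--     matches = True
--     for line in data_lines:
--         if matches:
--             try:
--                 items = [s.strip() for s in line.split()]
--                 if (len(items) < 10) or (len(items) > 11):
--                     matches = False
--                 try:
--                     vals = [int(s) for s in items[0:3]]
--                     if  vals[0] < 1:   matches = False
--                     if (vals[1] < 1) or (vals[1] > 12): matches = False
--                     if (vals[2] < 1) or (vals[2] > 4):  matches = False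
--                     vals = [float(s) for s in items[3:len(items)]]  # JAK?: this may be problematic for negative values???
--                 except:
--                     matches = False
--             except:
--                 matches = False
--     if matches:
--         return 'cglrrm'
--
--     #
--     #  Second check for matching the new daily tabular format.
--     #  Valid lines have YYYY-MM plus 31 data values.
--     #
--     matches = True
--     for line in data_lines:
--         if matches:
--             try:
--                 items = [s.strip() for s in line.split(',')]
--                 if len(items) < 32:
--                     matches = False
--                 try:
--                     vals = [int(s) for s in items[0].split('-')]
--                     if  vals[0] < 1: matches = False
--                     if (vals[1] < 1) or (vals[1] > 12): matches = False
--                     vals = [float(s) for s in items[2:len(items)]]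
--                 except:
--                     matches = False
--             except:
--                 matches = False
--     if matches:
--         return 'table'
--
--     #
--     #  Third check is for matching the new daily columnar format.
--     #  Valid lines have YYYY-MM-DD plus 1 data value.
--     #
--     matches = True
--     for line in data_lines:
--         if matches:
--             try:
--                 items = [s.strip() for s in line.split(',')]
--                 if len(items) != 2:
--                     matches = False
--                 try:
--                     vals = [int(s) for s in items[0].split('-')]
--                     if  vals[0] < 1: matches = False
--                     if (vals[1] < 1) or (vals[1] > 12): matches = False
--                     if (vals[2] < 1) or (vals[2] > 31): matches = False
--                     vals = float(items[1])
--                 except: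
--                     matches = False
--             except:
--                 matches = False
--     if matches:
--         return 'column'
--
--     #
--     #  If we get to here it means all 3 tests failed.
--     #
--     return 'unknown'
-- ===== SOURCE B (Python) =====
-- def detectDailyFormat(data_lines):
--     # Single fused pass: keep a 3-bit mask of formats still viable
--     # (bit 0 = cglrrm, bit 1 = table, bit 2 = column), AND in each line's
--     # own mask, stop early when no format survives; then report the
--     # lowest set bit's label, so priority order matches the spec.
--
--     def _cglrrm(line):
--         try:
--             items = [s.strip() for s in line.split()]
--             if len(items) < 10 or len(items) > 11:
--                 return False
--             vals = [int(s) for s in items[:3]]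
--             if vals[0] < 1 or vals[1] < 1 or vals[1] > 12 or vals[2] < 1 or vals[2] > 4:
--                 return False
--             for s in items[3:]:
--                 float(s)
--             return True
--         except Exception:
--             return False
--
--     def _table(line):
--         try:
--             items = [s.strip() for s in line.split(',')]
--             if len(items) < 32:
--                 return False
--             vals = [int(s) for s in items[0].split('-')]
--             if vals[0] < 1 or vals[1] < 1 or vals[1] > 12:
--                 return False
--             for s in items[2:]:
--                 float(s)
--             return True
--         except Exception:
--             return False
--
--     def _column(line):
--         try:
--             items = [s.strip() for s in line.split(',')]
--             if len(items) != 2: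
--                 return False
--             vals = [int(s) for s in items[0].split('-')]
--             if vals[0] < 1 or vals[1] < 1 or vals[1] > 12 or vals[2] < 1 or vals[2] > 31:
--                 return False
--             float(items[1])
--             return True
--         except Exception:
--             return False
--
--     mask = 7
--     for line in data_lines:
--         mask &= (1 if _cglrrm(line) else 0) | (2 if _table(line) else 0) | (4 if _column(line) else 0)
--         if mask == 0:
--             break
--     if mask & 1:
--         return 'cglrrm'
--     if mask & 2:
--         return 'table'
--     if mask & 4:
--         return 'column'
--     return 'unknown'
-- ===== Notes on version B (the rewrite author's own statement) =====
-- stated objective: alternative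
-- what changed: Replaces A's three staged sticky-flag passes over all lines (one per format) by a single fused pass that ANDs a 3-bit mask of still-viable formats per line and exits early once the mask is empty, then maps the lowest surviving bit to its label.
import Mathlib
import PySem

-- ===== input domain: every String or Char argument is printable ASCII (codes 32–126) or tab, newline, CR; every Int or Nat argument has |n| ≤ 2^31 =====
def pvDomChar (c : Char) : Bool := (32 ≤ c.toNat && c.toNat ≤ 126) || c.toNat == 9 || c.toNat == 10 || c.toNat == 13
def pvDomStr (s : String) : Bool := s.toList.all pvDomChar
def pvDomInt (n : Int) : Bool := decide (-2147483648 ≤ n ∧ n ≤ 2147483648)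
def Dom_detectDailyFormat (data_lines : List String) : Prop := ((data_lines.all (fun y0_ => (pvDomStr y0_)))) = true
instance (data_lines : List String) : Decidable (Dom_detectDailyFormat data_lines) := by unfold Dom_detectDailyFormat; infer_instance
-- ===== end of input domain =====

-- B replaces A's three staged sticky-flag passes by ONE fused pass over the lines that ANDs a
-- 3-bit mask of still-viable formats (bit0=cglrrm, bit1=table, bit2=column) with early exit,
-- then reports the lowest surviving bit's label (objective: alternative).


-- ===== PORT A =====
-- Shared primitive (used by both ports in place of Python's built-in `float`):
-- pvFloatOK cs = true iff `float(s)` succeeds (false = ValueError). Hand-ported; exact on ASCII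
-- strings (the Dom): CPython's grammar [ws][sign](inf|infinity|nan | digits['.'digits?] | '.'digits)
-- [('e'|'E')[sign]digits][ws], case-insensitive, a single '_' allowed only between digits.
def pvDigRest : List Char → List Char
  | [] => []
  | [c] => if c.isDigit then [] else [c]
  | c :: d :: rest =>
    if c.isDigit then pvDigRest (d :: rest)
    else if c = '_' ∧ d.isDigit then pvDigRest rest
    else c :: d :: rest

def pvDigPart? : List Char → Option (List Char)
  | c :: rest => if c.isDigit then some (pvDigRest rest) else none
  | [] => none

def pvMant? (cs : List Char) : Option (List Char) :=
  match pvDigPart? cs with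
  | some rest =>
    match rest with
    | '.' :: rest2 =>
      match pvDigPart? rest2 with
      | some r => some r
      | none => some rest2
    | _ => some rest
  | none =>
    match cs with
    | '.' :: rest2 => pvDigPart? rest2
    | _ => none

def pvExpTail (cs : List Char) : Bool :=
  match cs with
  | [] => true
  | 'e' :: rest =>
    let rest2 := match rest with
      | '+' :: r => r
      | '-' :: r => r
      | r => r
    match pvDigPart? rest2 with
    | some [] => true
    | _ => false
  | _ => false

def pvFloatOK (cs : List Char) : Bool :=
  let t := PySem.Chars.lower (PySem.Chars.strip cs)
  let t := match t with
    | '+' :: r => r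
    | '-' :: r => r
    | r => r
  if t = ['i','n','f'] ∨ t = ['i','n','f','i','n','i','t','y'] ∨ t = ['n','a','n'] then true
  else
    match pvMant? t with
    | some rest => pvExpTail rest
    | none => false

-- One iteration of A's first loop body ('if matches: try: … except: matches = False';
-- strings handled on the List Char side throughout, per the PySem convention).
-- `.mapM PySem.Int.ofChars?` is the list comprehension [int(s) for s in …] (none = ValueError);
-- `vals[k]` is pyGet? (none = IndexError → except); the final `… .all pvFloatOK` test is
-- [float(s) for s in …] (false = ValueError → except).
def aStep1 (m : Bool) (line : String) : Bool :=
  if m then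
    let items := (PySem.Chars.split₀ line.toList).map PySem.Chars.strip
    let m := if PySem.List.len items < 10 ∨ PySem.List.len items > 11 then false else m
    match (PySem.List.slice items (some 0) (some 3)).mapM PySem.Int.ofChars? with
    | none => false
    | some vals =>
      match PySem.List.pyGet? vals 0 with
      | none => false
      | some v0 =>
        let m := if v0 < 1 then false else m
        match PySem.List.pyGet? vals 1 with
        | none => false
        | some v1 =>
          let m := if v1 < 1 ∨ v1 > 12 then false else m
          match PySem.List.pyGet? vals 2 with
          | none => false
          | some v2 =>
            let m := if v2 < 1 ∨ v2 > 4 then false else m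
            if (PySem.List.slice items (some 3) (some (PySem.List.len items))).all pvFloatOK then m else false
  else m

def aStep2 (m : Bool) (line : String) : Bool :=
  if m then
    let items := (PySem.Chars.splitOn line.toList [',']).map PySem.Chars.strip
    let m := if PySem.List.len items < 32 then false else m
    match PySem.List.pyGet? items 0 with
    | none => false
    | some it0 =>
      match (PySem.Chars.splitOn it0 ['-']).mapM PySem.Int.ofChars? with
      | none => false
      | some vals =>
        match PySem.List.pyGet? vals 0 with
        | none => false
        | some v0 =>
          let m := if v0 < 1 then false else m
          match PySem.List.pyGet? vals 1 with
          | none => false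
          | some v1 =>
            let m := if v1 < 1 ∨ v1 > 12 then false else m
            if (PySem.List.slice items (some 2) (some (PySem.List.len items))).all pvFloatOK then m else false
  else m

def aStep3 (m : Bool) (line : String) : Bool :=
  if m then
    let items := (PySem.Chars.splitOn line.toList [',']).map PySem.Chars.strip
    let m := if ¬ (PySem.List.len items = 2) then false else m
    match PySem.List.pyGet? items 0 with
    | none => false
    | some it0 =>
      match (PySem.Chars.splitOn it0 ['-']).mapM PySem.Int.ofChars? with
      | none => false
      | some vals =>
        match PySem.List.pyGet? vals 0 with
        | none => false
        | some v0 =>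
          let m := if v0 < 1 then false else m
          match PySem.List.pyGet? vals 1 with
          | none => false
          | some v1 =>
            let m := if v1 < 1 ∨ v1 > 12 then false else m
            match PySem.List.pyGet? vals 2 with
            | none => false
            | some v2 =>
              let m := if v2 < 1 ∨ v2 > 31 then false else m
              match PySem.List.pyGet? items 1 with
              | none => false
              | some s1 => if pvFloatOK s1 then m else false
  else m

def detectDailyFormat (data_lines : List String) : String :=
  if data_lines.foldl aStep1 true then "cglrrm"
  else if data_lines.foldl aStep2 true then "table"
  else if data_lines.foldl aStep3 true then "column"
  else "unknown"

-- ===== PORT B =====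
-- B's per-line early-return predicates (same parsing primitives as PORT A's steps).
def bCglrrm (line : String) : Bool :=
  let items := (PySem.Chars.split₀ line.toList).map PySem.Chars.strip
  if items.length < 10 ∨ items.length > 11 then false
  else
    match (PySem.List.slice items none (some 3)).mapM PySem.Int.ofChars? with
    | none => false
    | some vals =>
      match PySem.List.pyGet? vals 0, PySem.List.pyGet? vals 1, PySem.List.pyGet? vals 2 with
      | some v0, some v1, some v2 =>
        if v0 < 1 ∨ v1 < 1 ∨ v1 > 12 ∨ v2 < 1 ∨ v2 > 4 then false
        else (PySem.List.slice items (some 3) none).all pvFloatOK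
      | _, _, _ => false

def bTable (line : String) : Bool :=
  let items := (PySem.Chars.splitOn line.toList [',']).map PySem.Chars.strip
  if items.length < 32 then false
  else
    match PySem.List.pyGet? items 0 with
    | none => false
    | some it0 =>
      match (PySem.Chars.splitOn it0 ['-']).mapM PySem.Int.ofChars? with
      | none => false
      | some vals =>
        match PySem.List.pyGet? vals 0, PySem.List.pyGet? vals 1 with
        | some v0, some v1 =>
          if v0 < 1 ∨ v1 < 1 ∨ v1 > 12 then false
          else (PySem.List.slice items (some 2) none).all pvFloatOK
        | _, _ => false

def bColumn (line : String) : Bool :=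
  let items := (PySem.Chars.splitOn line.toList [',']).map PySem.Chars.strip
  if items.length ≠ 2 then false
  else
    match PySem.List.pyGet? items 0 with
    | none => false
    | some it0 =>
      match (PySem.Chars.splitOn it0 ['-']).mapM PySem.Int.ofChars? with
      | none => false
      | some vals =>
        match PySem.List.pyGet? vals 0, PySem.List.pyGet? vals 1, PySem.List.pyGet? vals 2 with
        | some v0, some v1, some v2 =>
          if v0 < 1 ∨ v1 < 1 ∨ v1 > 12 ∨ v2 < 1 ∨ v2 > 31 then false
          else
            match PySem.List.pyGet? items 1 with
            | none => false
            | some s1 => pvFloatOK s1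
        | _, _, _ => false

-- The line's 3-bit viability mask: Python's `|` / `&` on ints are Int.lor / Int.land.
def bLineMask (line : String) : Int :=
  Int.lor (Int.lor (if bCglrrm line then 1 else 0) (if bTable line then 2 else 0))
    (if bColumn line then 4 else 0)

-- The fused loop: `mask &= lineMask(line)` with `if mask == 0: break`.
def bLoop : Int → List String → Int
  | m, [] => m
  | m, line :: rest =>
    let m' := Int.land m (bLineMask line)
    if m' = 0 then m' else bLoop m' rest

def detectDailyFormat_alt (data_lines : List String) : String :=
  let mask := bLoop 7 data_lines
  if Int.land mask 1 ≠ 0 then "cglrrm"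
  else if Int.land mask 2 ≠ 0 then "table"
  else if Int.land mask 4 ≠ 0 then "column"
  else "unknown"

-- ===== PRECONDITION & SPEC =====
def Spec_detectDailyFormat (data_lines : List String) (out : String) : Prop := out = detectDailyFormat_alt data_lines
instance (data_lines : List String) (out : String) : Decidable (Spec_detectDailyFormat data_lines out) := by unfold Spec_detectDailyFormat; infer_instance

-- ===== CLAIM (what is proved, stated in full; the proofs are below) =====
def Claim_equal_detectDailyFormat : Prop := ∀ (data_lines : List String), Dom_detectDailyFormat data_lines → Spec_detectDailyFormat data_lines (detectDailyFormat data_lines)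

-- ===== LEMMAS AND PROOFS =====
-- 3-bit encoding used only by the proofs.
def pvEnc (b0 b1 b2 : Bool) : Int :=
  (if b0 then 1 else 0) + (if b1 then 2 else 0) + (if b2 then 4 else 0)

lemma pv_lineMask_enc (l : String) : bLineMask l = pvEnc (bCglrrm l) (bTable l) (bColumn l) := by
  unfold bLineMask pvEnc
  cases bCglrrm l <;> cases bTable l <;> cases bColumn l <;> decide

lemma pv_land_enc (b0 b1 b2 c0 c1 c2 : Bool) :
    Int.land (pvEnc b0 b1 b2) (pvEnc c0 c1 c2) = pvEnc (b0 && c0) (b1 && c1) (b2 && c2) := by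
  unfold pvEnc; revert b0 b1 b2 c0 c1 c2; decide

lemma pv_enc_zero (b0 b1 b2 : Bool) : pvEnc b0 b1 b2 = 0 ↔ b0 = false ∧ b1 = false ∧ b2 = false := by
  unfold pvEnc; revert b0 b1 b2; decide

lemma pv_bLoop_enc (ls : List String) : ∀ b0 b1 b2 : Bool,
    bLoop (pvEnc b0 b1 b2) ls
      = pvEnc (b0 && ls.all bCglrrm) (b1 && ls.all bTable) (b2 && ls.all bColumn) := by
  induction ls with
  | nil => intro b0 b1 b2; simp [bLoop]
  | cons l rest ih =>
    intro b0 b1 b2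
    simp only [bLoop, pv_lineMask_enc, pv_land_enc, List.all_cons, ← Bool.and_assoc]
    split_ifs with h
    · rcases (pv_enc_zero _ _ _).mp h with ⟨h0, h1, h2⟩
      rw [h, h0, h1, h2]
      simp [pvEnc]
    · exact ih _ _ _

-- A's 'if matches:' guard makes each loop a sticky conjunction: the fold is b && all-lines-pass.
lemma pv_foldl_sticky (step : Bool → String → Bool) (g : String → Bool)
    (ht : ∀ l, step true l = g l) (hf : ∀ l, step false l = false) :
    ∀ (ls : List String) (b : Bool), ls.foldl step b = (b && ls.all g) := by
  intro ls
  induction ls with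
  | nil => intro b; simp
  | cons l ls ih =>
    intro b
    cases b with
    | false => simp [List.foldl_cons, hf, ih]
    | true => simp [List.foldl_cons, ht, ih]

-- xs[a:len(xs)] (A's slices) = xs[a:] (B's slices)
lemma pv_slice_len {α : Type} (xs : List α) (a : Int) (ha : 0 ≤ a) :
    PySem.List.slice xs (some a) (some (xs.length : Int)) = PySem.List.slice xs (some a) none := by
  rw [PySem.List.slice_toNat xs ha (by positivity), PySem.List.slice_from xs ha]
  exact List.take_of_length_le (by simp)

lemma aStep1_true (l : String) : aStep1 true l = bCglrrm l := by
  simp only [aStep1, bCglrrm, if_true, PySem.List.slice_zero_start, PySem.List.len_eq,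
    pv_slice_len _ 3 (by norm_num)]
  generalize (PySem.Chars.split₀ l.toList).map PySem.Chars.strip = items
  cases h : (PySem.List.slice items none (some 3)).mapM PySem.Int.ofChars? with
  | none => split_ifs <;> rfl
  | some vals =>
    cases h0 : PySem.List.pyGet? vals 0 <;>
    cases h1 : PySem.List.pyGet? vals 1 <;>
    cases h2 : PySem.List.pyGet? vals 2 <;>
    simp only [h0, h1, h2] <;> split_ifs <;> first | rfl | omega | simp_all

lemma aStep2_true (l : String) : aStep2 true l = bTable l := by
  simp only [aStep2, bTable, if_true, PySem.List.len_eq, pv_slice_len _ 2 (by norm_num)]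
  generalize (PySem.Chars.splitOn l.toList [',']).map PySem.Chars.strip = items
  cases h : PySem.List.pyGet? items 0 with
  | none => split_ifs <;> rfl
  | some it0 =>
    dsimp only
    cases hm : (PySem.Chars.splitOn it0 ['-']).mapM PySem.Int.ofChars? with
    | none => split_ifs <;> rfl
    | some vals =>
      cases h0 : PySem.List.pyGet? vals 0 <;>
      cases h1 : PySem.List.pyGet? vals 1 <;>
      simp only [h0, h1] <;> split_ifs <;> first | rfl | omega | simp_all

lemma aStep3_true (l : String) : aStep3 true l = bColumn l := by
  simp only [aStep3, bColumn, if_true, PySem.List.len_eq]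
  generalize (PySem.Chars.splitOn l.toList [',']).map PySem.Chars.strip = items
  cases h : PySem.List.pyGet? items 0 with
  | none => split_ifs <;> rfl
  | some it0 =>
    dsimp only
    cases hm : (PySem.Chars.splitOn it0 ['-']).mapM PySem.Int.ofChars? with
    | none => split_ifs <;> rfl
    | some vals =>
      cases h0 : PySem.List.pyGet? vals 0 <;>
      cases h1 : PySem.List.pyGet? vals 1 <;>
      cases h2 : PySem.List.pyGet? vals 2 <;>
      cases hs : PySem.List.pyGet? items 1 <;>
      simp only [h0, h1, h2] <;> split_ifs <;> first | rfl | omega | simp_all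

lemma aStep1_false (l : String) : aStep1 false l = false := rfl
lemma aStep2_false (l : String) : aStep2 false l = false := rfl
lemma aStep3_false (l : String) : aStep3 false l = false := rfl

-- ===== VERDICT (by name: the statement is the Claim_ definition above) =====
theorem detectDailyFormat_spec : Claim_equal_detectDailyFormat := by
  intro dl _
  unfold Spec_detectDailyFormat detectDailyFormat detectDailyFormat_alt
  rw [pv_foldl_sticky aStep1 bCglrrm aStep1_true aStep1_false,
      pv_foldl_sticky aStep2 bTable aStep2_true aStep2_false,
      pv_foldl_sticky aStep3 bColumn aStep3_true aStep3_false]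
  have h7 : (7 : Int) = pvEnc true true true := by decide
  rw [h7, pv_bLoop_enc]
  cases dl.all bCglrrm <;> cases dl.all bTable <;> cases dl.all bColumn <;> simp [pvEnc] <;> decide
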